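-- pv_equiv track=rewrite | github.com/Faycal214/VRPTW-Optimization-for-Last-Mile-Delivery-ALNS | experiments/run.py | _coverage_report
-- ===== SOURCE A (Python) =====
-- from typing import Dict, List, Tuple
--
-- def _coverage_report(routes: List[List[int]], num_customers: int) -> Tuple[int, List[int], List[int]]:
--     """Return unique visited count, missing customers, and duplicates."""
--     visited = set()
--     duplicates = set()
--
--     for route in routes:
--         for node in route:
--             if node == 0:
--                 continue
--             if node in visited:
--                 duplicates.add(node)
--             visited.add(node)
--
--     expected = set(range(1, num_customers + 1))
--     missing = sorted(expected - visited)
--     duplicates = sorted(duplicates)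
--     return len(visited), missing, duplicates
-- ===== SOURCE B (Python) =====
-- from typing import Dict, List, Tuple
--
-- def _coverage_report(routes: List[List[int]], num_customers: int) -> Tuple[int, List[int], List[int]]:
--     """Return unique visited count, missing customers, and duplicates."""
--     # Sort-then-scan: sort the non-depot nodes once, read distinct values and
--     # duplicate values off adjacent runs, and obtain the missing customers by a
--     # two-pointer merge of the expected range against the sorted distinct list.
--     nodes = sorted(n for route in routes for n in route if n != 0)
--     distinct = []
--     duplicates = []
--     k = 0
--     while k < len(nodes):
--         j = k + 1
--         while j < len(nodes) and nodes[j] == nodes[k]: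
--             j += 1
--         distinct.append(nodes[k])
--         if j - k > 1:
--             duplicates.append(nodes[k])
--         k = j
--     expected = list(range(1, num_customers + 1))
--     missing = []
--     i = j = 0
--     while i < len(expected):
--         if j < len(distinct) and distinct[j] < expected[i]:
--             j += 1
--         elif j < len(distinct) and distinct[j] == expected[i]:
--             i += 1
--             j += 1
--         else:
--             missing.append(expected[i])
--             i += 1
--     return len(distinct), missing, duplicates
-- ===== Notes on version B (the rewrite author's own statement) =====
-- stated objective: alternative
-- what changed: Replaces A's hash-set membership algorithm (seen/duplicate sets maintained inline, set difference for missing, two final sorts) by a sort-then-scan algorithm: the non-depot nodes are sorted once, distinct and duplicate values are read off adjacent runs in one linear scan, and missing customers come from a two-pointer merge of the expected range against the sorted distinct list, so no sets and no final sorts are needed.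
import Mathlib
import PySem

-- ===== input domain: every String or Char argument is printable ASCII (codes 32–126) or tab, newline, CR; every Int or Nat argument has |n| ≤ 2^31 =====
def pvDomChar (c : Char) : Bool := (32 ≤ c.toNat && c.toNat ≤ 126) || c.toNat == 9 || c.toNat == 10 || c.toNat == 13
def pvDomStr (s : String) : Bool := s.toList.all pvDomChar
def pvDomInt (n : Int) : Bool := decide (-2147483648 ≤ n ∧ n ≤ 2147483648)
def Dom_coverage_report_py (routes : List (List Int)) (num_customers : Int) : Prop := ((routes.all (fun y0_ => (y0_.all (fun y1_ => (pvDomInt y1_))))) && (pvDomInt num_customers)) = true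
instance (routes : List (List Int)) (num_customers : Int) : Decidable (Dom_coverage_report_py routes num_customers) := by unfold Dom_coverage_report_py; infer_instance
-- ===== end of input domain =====

-- B replaces A's seen/duplicate-set algorithm by sort-then-scan: sort the non-depot nodes once, read distinct/duplicate values off adjacent runs, and merge the expected range against the sorted distinct list; an alternative algorithm of similar cost (objective: alternative, not faster).

-- ===== PORT A =====
def coverage_report_py (routes : List (List Int)) (num_customers : Int) : Int × List Int × List Int :=
  let vd : PySem.Set Int × PySem.Set Int :=
    routes.foldl (fun vd route =>
      route.foldl (fun vd node =>
        if node == 0 then vd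
        else (PySem.Set.add vd.1 node,
              if PySem.Set.contains vd.1 node then PySem.Set.add vd.2 node else vd.2)) vd)
      (PySem.Set.empty, PySem.Set.empty)
  let expected : PySem.Set Int := PySem.Set.ofList (PySem.List.pyRange 1 (num_customers + 1) 1)
  let missing := PySem.List.sorted (PySem.Set.diff expected vd.1) (fun x => x) false
  let dups := PySem.List.sorted vd.2 (fun x => x) false
  ((PySem.Set.len vd.1 : Int), missing, dups)

-- ===== PORT B =====
-- the outer while loop over k: state is the unprocessed suffix nodes[k:]; the inner
-- while advancing j past equal nodes is the takeWhile/dropWhile split of that suffix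
def pvRuns (s : List Int) : List Int × List Int :=
  match s with
  | [] => ([], [])
  | n :: rest =>
      let p := pvRuns (rest.dropWhile (fun m => m == n))
      (n :: p.1, if rest.takeWhile (fun m => m == n) = [] then p.2 else n :: p.2)
termination_by s.length
decreasing_by
  simp only [List.length_cons]
  exact Nat.lt_succ_of_le (rest.length_dropWhile_le _)

-- the two-pointer while loop over i, j: state is the unprocessed suffixes expected[i:], distinct[j:]
def pvMerge : List Int → List Int → List Int
  | [], _ => []
  | e :: es, [] => e :: pvMerge es []
  | e :: es, d :: ds =>
      if d < e then pvMerge (e :: es) ds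
      else if d == e then pvMerge es ds
      else e :: pvMerge es (d :: ds)
termination_by es ds => es.length + ds.length

def coverage_report_py_alt (routes : List (List Int)) (num_customers : Int) : Int × List Int × List Int :=
  let nodes := PySem.List.sorted (routes.flatMap (fun route => route.filter (fun n => !(n == 0)))) (fun x => x) false
  let p := pvRuns nodes
  let expected := PySem.List.pyRange 1 (num_customers + 1) 1
  let missing := pvMerge expected p.1
  ((p.1.length : Int), missing, p.2)

-- ===== PRECONDITION & SPEC =====
def Spec_coverage_report_py (routes : List (List Int)) (num_customers : Int) (out : Int × List Int × List Int) : Prop := out = coverage_report_py_alt routes num_customers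
instance (routes : List (List Int)) (num_customers : Int) (out : Int × List Int × List Int) : Decidable (Spec_coverage_report_py routes num_customers out) := by unfold Spec_coverage_report_py; infer_instance

-- ===== CLAIM (what is proved, stated in full; the proofs are below) =====
def Claim_equal_coverage_report_py : Prop := ∀ (routes : List (List Int)) (num_customers : Int), Dom_coverage_report_py routes num_customers → Spec_coverage_report_py routes num_customers (coverage_report_py routes num_customers)

-- ===== LEMMAS AND PROOFS =====

-- A's per-node step, once the 'node == 0: continue' guard has been turned into a filter.
def pvStepA (vd : PySem.Set Int × PySem.Set Int) (node : Int) : PySem.Set Int × PySem.Set Int :=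
  (PySem.Set.add vd.1 node,
   if PySem.Set.contains vd.1 node then PySem.Set.add vd.2 node else vd.2)

-- A nested 'for route in routes: for node in route' fold is a fold over the flattened list.
theorem pvFoldlFlatten {σ : Type} (L : List (List Int)) (f : σ → Int → σ) (init : σ) :
    L.foldl (fun s r => r.foldl f s) init = L.flatten.foldl f init := by
  induction L generalizing init with
  | nil => rfl
  | cons r L ih => simp [List.foldl_append, ih]

theorem pvA_fold (routes : List (List Int)) :
    routes.foldl (fun vd route =>
      route.foldl (fun vd node =>
        if node == 0 then vd
        else (PySem.Set.add vd.1 node,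
              if PySem.Set.contains vd.1 node then PySem.Set.add vd.2 node else vd.2)) vd)
      (PySem.Set.empty, PySem.Set.empty)
    = (routes.flatten.filter (fun x => !(x == 0))).foldl pvStepA (PySem.Set.empty, PySem.Set.empty) := by
  rw [pvFoldlFlatten, ← PySem.List.foldl_if_eq_foldl_filter]
  apply PySem.List.foldl_congr_mem
  intro acc x _
  by_cases h : x == 0 <;> simp [h, pvStepA]

theorem pvFstA (l : List Int) (v d : PySem.Set Int) :
    (l.foldl pvStepA (v, d)).1 = l.foldl PySem.Set.add v := by
  induction l generalizing v d with
  | nil => rfl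
  | cons a t ih =>
      simp only [List.foldl_cons, pvStepA]
      exact ih _ _

theorem pvMemSndA (l : List Int) (v d : PySem.Set Int) (x : Int) :
    x ∈ (l.foldl pvStepA (v, d)).2 ↔ x ∈ d ∨ (x ∈ v ∧ x ∈ l) ∨ 2 ≤ l.count x := by
  induction l generalizing v d with
  | nil => simp
  | cons a t ih =>
      simp only [List.foldl_cons, pvStepA]
      rw [ih]
      by_cases hx : x = a
      · subst hx
        split_ifs with hc
        · have hv : x ∈ v := by simpa using hc
          constructor
          · intro _
            exact Or.inr (Or.inl ⟨hv, by simp⟩)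
          · intro _
            exact Or.inl (by simp [PySem.Set.mem_add])
        · have hv : x ∉ v := by simpa using hc
          have hxadd : x ∈ PySem.Set.add v x := by simp [PySem.Set.mem_add]
          constructor
          · rintro (h | h | h)
            · exact Or.inl h
            · have hp : 0 < t.count x := List.count_pos_iff.mpr h.2
              refine Or.inr (Or.inr ?_)
              rw [List.count_cons_self]
              omega
            · refine Or.inr (Or.inr ?_)
              rw [List.count_cons_self]
              omega
          · rintro (h | h | h)
            · exact Or.inl h
            · exact absurd h.1 hv
            · rw [List.count_cons_self] at h
              by_cases ht : 2 ≤ t.count x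
              · exact Or.inr (Or.inr ht)
              · have hmem : x ∈ t := List.count_pos_iff.mp (by omega)
                exact Or.inr (Or.inl ⟨hxadd, hmem⟩)
      · have hx2 : ¬a = x := fun h => hx h.symm
        split_ifs with hva <;>
          simp [PySem.Set.mem_add, hx, hx2, List.mem_cons]

theorem pvNodupSndA (l : List Int) (v d : PySem.Set Int) (hd : d.Nodup) :
    (l.foldl pvStepA (v, d)).2.Nodup := by
  induction l generalizing v d with
  | nil => simpa
  | cons a t ih =>
      simp only [List.foldl_cons, pvStepA]
      apply ih
      split_ifs
      · first
        | exact PySem.Set.nodup_add d hd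
        | exact PySem.Set.nodup_add hd
        | (apply PySem.Set.nodup_add; exact hd)
      · exact hd

-- elements past the run of n in a sorted list are strictly greater than n
theorem pvDropGt (n : Int) (rest : List Int)
    (hs : (n :: rest).Pairwise (· ≤ ·)) :
    ∀ x ∈ rest.dropWhile (fun m => m == n), n < x := by
  have hle : ∀ x ∈ rest, n ≤ x := fun x hx => (List.pairwise_cons.mp hs).1 x hx
  have hrest : rest.Pairwise (· ≤ ·) := (List.pairwise_cons.mp hs).2
  cases hd : rest.dropWhile (fun m => m == n) with
  | nil => intro x hx; simp at hx
  | cons h tl =>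
      have hsub : (rest.dropWhile (fun m => m == n)).Sublist rest := List.dropWhile_sublist _
      have hne : ¬ ((fun m => m == n) h = true) := by
        have := List.head_dropWhile_not (p := fun m => m == n) (l := rest)
          (by rw [hd]; exact List.cons_ne_nil _ _)
        simpa [hd] using this
      have hhn : h ≠ n := by simpa using hne
      have hhmem : h ∈ rest := hsub.mem (by rw [hd]; exact List.mem_cons_self)
      have hnh : n < h := lt_of_le_of_ne (hle h hhmem) (Ne.symm hhn)
      have hdp : (h :: tl).Pairwise (· ≤ ·) := hd ▸ hrest.sublist hsub
      intro x hx
      rcases List.mem_cons.mp hx with rfl | hx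
      · exact hnh
      · exact lt_of_lt_of_le hnh ((List.pairwise_cons.mp hdp).1 x hx)

theorem pvRunsMemFst (s : List Int) (x : Int) :
    x ∈ (pvRuns s).1 ↔ x ∈ s := by
  induction s using pvRuns.induct with
  | case1 => simp [pvRuns]
  | case2 n rest ih =>
      simp only [pvRuns]
      simp only [List.mem_cons, ih]
      constructor
      · rintro (rfl | hx)
        · exact Or.inl rfl
        · exact Or.inr ((List.dropWhile_sublist _).mem hx)
      · rintro (rfl | hx)
        · exact Or.inl rfl
        · rw [← List.takeWhile_append_dropWhile (p := fun m => m == n) (l := rest)] at hx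
          rcases List.mem_append.mp hx with hx | hx
          · exact Or.inl (by simpa using List.mem_takeWhile_imp hx)
          · exact Or.inr hx

theorem pvRunsLtFst (s : List Int) (hs : s.Pairwise (· ≤ ·)) :
    (pvRuns s).1.Pairwise (· < ·) := by
  induction s using pvRuns.induct with
  | case1 => simp [pvRuns]
  | case2 n rest ih =>
      simp only [pvRuns]
      rw [List.pairwise_cons]
      have hrest : rest.Pairwise (· ≤ ·) := (List.pairwise_cons.mp hs).2
      have hdp : (rest.dropWhile (fun m => m == n)).Pairwise (· ≤ ·) :=
        hrest.sublist (List.dropWhile_sublist _)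
      refine ⟨?_, ih hdp⟩
      intro x hx
      exact pvDropGt n rest hs x ((pvRunsMemFst _ x).mp hx)

theorem pvRunsMemSnd (s : List Int) (hs : s.Pairwise (· ≤ ·)) (x : Int) :
    x ∈ (pvRuns s).2 ↔ 2 ≤ s.count x := by
  induction s using pvRuns.induct with
  | case1 => simp [pvRuns]
  | case2 n rest ih =>
      simp only [pvRuns]
      have hrest : rest.Pairwise (· ≤ ·) := (List.pairwise_cons.mp hs).2
      have hdp : (rest.dropWhile (fun m => m == n)).Pairwise (· ≤ ·) :=
        hrest.sublist (List.dropWhile_sublist _)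
      have ih' := ih hdp
      have hnotdrop : n ∉ rest.dropWhile (fun m => m == n) := fun h =>
        absurd (pvDropGt n rest hs n h) (lt_irrefl n)
      have htake : ∀ m ∈ rest.takeWhile (fun m => m == n), m = n := fun m hm => by
        simpa using List.mem_takeWhile_imp hm
      have hsplit : rest = rest.takeWhile (fun m => m == n) ++ rest.dropWhile (fun m => m == n) :=
        (List.takeWhile_append_dropWhile).symm
      by_cases hx : x = n
      · subst hx
        have hc0 : (rest.dropWhile (fun m => m == x)).count x = 0 :=
          List.count_eq_zero.mpr hnotdrop
        have hct : (rest.takeWhile (fun m => m == x)).count x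
            = (rest.takeWhile (fun m => m == x)).length :=
          List.count_eq_length.mpr (fun b hb => (htake b hb).symm)
        have hcount : (x :: rest).count x
            = 1 + (rest.takeWhile (fun m => m == x)).length := by
          rw [List.count_cons_self]
          conv_lhs => rw [hsplit]
          rw [List.count_append, hc0, hct]
          omega
        rw [hcount]
        by_cases ht : rest.takeWhile (fun m => m == x) = []
        · simp [ht, ih', hc0]
        · have hlen : 1 ≤ (rest.takeWhile (fun m => m == x)).length :=
            Nat.one_le_iff_ne_zero.mpr (by simpa [List.length_eq_zero_iff] using ht)
          rw [if_neg ht]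
          constructor
          · intro _; omega
          · intro _; exact List.mem_cons_self
      · have hcx : (rest.takeWhile (fun m => m == n)).count x = 0 :=
          List.count_eq_zero.mpr (fun h => hx (htake x h))
        have hcount : (n :: rest).count x = (rest.dropWhile (fun m => m == n)).count x := by
          have hnx : ¬(n = x) := fun h => hx h.symm
          rw [List.count_cons]
          conv_lhs => rw [hsplit]
          rw [List.count_append, hcx]
          simp [hnx]
        rw [hcount, ← ih']
        by_cases ht : rest.takeWhile (fun m => m == n) = [] <;>
          simp [ht, hx]

theorem pvRunsLtSnd (s : List Int) (hs : s.Pairwise (· ≤ ·)) :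
    (pvRuns s).2.Pairwise (· < ·) := by
  induction s using pvRuns.induct with
  | case1 => simp [pvRuns]
  | case2 n rest ih =>
      simp only [pvRuns]
      have hrest : rest.Pairwise (· ≤ ·) := (List.pairwise_cons.mp hs).2
      have hdp : (rest.dropWhile (fun m => m == n)).Pairwise (· ≤ ·) :=
        hrest.sublist (List.dropWhile_sublist _)
      have htl := ih hdp
      by_cases ht : rest.takeWhile (fun m => m == n) = []
      · simpa [ht] using htl
      · rw [if_neg ht, List.pairwise_cons]
        refine ⟨?_, htl⟩
        intro x hx
        have hcnt := (pvRunsMemSnd _ hdp x).mp hx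
        have hmem : x ∈ rest.dropWhile (fun m => m == n) :=
          List.count_pos_iff.mp (by omega)
        exact pvDropGt n rest hs x hmem

-- the two-pointer merge of two strictly increasing lists is the membership filter
theorem pvMergeEq (exp dist : List Int)
    (he : exp.Pairwise (· < ·)) (hd : dist.Pairwise (· < ·)) :
    pvMerge exp dist = exp.filter (fun e => decide (e ∉ dist)) := by
  induction exp, dist using pvMerge.induct with
  | case1 dist => rw [pvMerge]; rfl
  | case2 e es ih =>
      rw [pvMerge]
      have hes : es.Pairwise (· < ·) := (List.pairwise_cons.mp he).2
      simp [ih hes (List.Pairwise.nil)]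
  | case3 e es d ds hlt ih =>
      rw [pvMerge, if_pos hlt]
      have hds : ds.Pairwise (· < ·) := (List.pairwise_cons.mp hd).2
      rw [ih he hds]
      apply List.filter_congr
      intro x hx
      have hge : e ≤ x := by
        rcases List.mem_cons.mp hx with rfl | hx
        · exact le_refl x
        · exact le_of_lt ((List.pairwise_cons.mp he).1 x hx)
      have hxd : x ≠ d := fun h => absurd hlt (by omega)
      simp [hxd]
  | case4 e es d ds hlt heq ih =>
      have hde : d = e := by simpa using heq
      rw [pvMerge, if_neg hlt, if_pos heq]
      have hes : es.Pairwise (· < ·) := (List.pairwise_cons.mp he).2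
      have hds : ds.Pairwise (· < ·) := (List.pairwise_cons.mp hd).2
      rw [ih hes hds]
      have hmem : e ∈ d :: ds := by rw [hde]; exact List.mem_cons_self
      rw [List.filter_cons_of_neg (by simp [hmem])]
      apply List.filter_congr
      intro x hx
      have hgt : e < x := (List.pairwise_cons.mp he).1 x hx
      have hxd : x ≠ d := fun h => by omega
      simp [hxd]
  | case5 e es d ds hlt heq ih =>
      have hde : ¬ d = e := by simpa using heq
      have hed : e < d := by
        rcases lt_trichotomy d e with h | h | h
        · exact absurd h hlt
        · exact absurd h hde
        · exact h
      rw [pvMerge, if_neg hlt, if_neg heq]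
      have hes : es.Pairwise (· < ·) := (List.pairwise_cons.mp he).2
      have henot : e ∉ d :: ds := by
        intro h
        rcases List.mem_cons.mp h with rfl | h
        · omega
        · exact absurd (lt_trans hed ((List.pairwise_cons.mp hd).1 e h)) (lt_irrefl e)
      rw [List.filter_cons_of_pos (by simpa using henot), ih hes hd]

theorem coverage_report_py_spec_aux (routes : List (List Int)) (num_customers : Int) :
    coverage_report_py routes num_customers = coverage_report_py_alt routes num_customers := by
  unfold coverage_report_py coverage_report_py_alt
  rw [pvA_fold]
  have hflat : routes.flatMap (fun route => route.filter (fun n => !(n == 0)))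
      = routes.flatten.filter (fun x => !(x == 0)) := by
    rw [List.flatMap_def, ← List.filter_flatten]
  rw [hflat]
  set l := routes.flatten.filter (fun x => !(x == 0)) with hl
  set F := l.foldl pvStepA (PySem.Set.empty, PySem.Set.empty) with hF
  set s := PySem.List.sorted l (fun x => x) false with hsdef
  have hperm : s.Perm l := PySem.List.sorted_perm l _ _
  have hs : s.Pairwise (· ≤ ·) := by simpa using PySem.List.sorted_pairwise l (fun x => x)
  have hV : F.1 = PySem.Set.ofList l := by
    rw [hF, pvFstA, PySem.Set.ofList_eq_foldl]
    rfl
  have hfstnd : (pvRuns s).1.Nodup := (pvRunsLtFst s hs).imp (fun h => ne_of_lt h)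
  have hmemfst : ∀ x : Int, x ∈ (pvRuns s).1 ↔ x ∈ l := by
    intro x
    rw [pvRunsMemFst]
    exact hperm.mem_iff
  -- component 1: visited count
  have h1 : (PySem.Set.len F.1 : Int) = ((pvRuns s).1.length : Int) := by
    have hp : (pvRuns s).1.Perm (PySem.Set.ofList l) := by
      rw [List.perm_ext_iff_of_nodup hfstnd (PySem.Set.nodup_ofList l)]
      intro a
      rw [hmemfst, PySem.Set.mem_ofList]
    rw [hV]
    simp [PySem.Set.len, hp.length_eq]
  -- component 2: missing
  have h2 : PySem.List.sorted
        (PySem.Set.diff (PySem.Set.ofList (PySem.List.pyRange 1 (num_customers + 1) 1)) F.1)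
        (fun x => x) false
      = pvMerge (PySem.List.pyRange 1 (num_customers + 1) 1) (pvRuns s).1 := by
    rw [pvMergeEq _ _ (PySem.List.pairwise_lt_pyRange_one 1 (num_customers + 1)) (pvRunsLtFst s hs)]
    apply PySem.List.sorted_eq_of_perm_of_pairwise_lt
    · rw [List.perm_ext_iff_of_nodup
        (List.Nodup.filter _ (PySem.List.nodup_pyRange_one _ _))
        (PySem.Set.nodup_diff _ _ (PySem.Set.nodup_ofList _))]
      intro a
      rw [PySem.Set.mem_diff, hV]
      simp [List.mem_filter, PySem.Set.mem_ofList, hmemfst]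
    · exact (PySem.List.pairwise_lt_pyRange_one 1 (num_customers + 1)).filter _
  -- component 3: duplicates
  have h3 : PySem.List.sorted F.2 (fun x => x) false = (pvRuns s).2 := by
    rw [hF]
    apply PySem.List.sorted_eq_of_perm_of_pairwise_lt
    · rw [List.perm_ext_iff_of_nodup
        ((pvRunsLtSnd s hs).imp (fun h => ne_of_lt h))
        (pvNodupSndA l PySem.Set.empty PySem.Set.empty List.nodup_nil)]
      intro a
      rw [pvRunsMemSnd s hs, pvMemSndA, hperm.count_eq]
      simp [PySem.Set.empty]
    · exact pvRunsLtSnd s hs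
  dsimp only
  rw [h1, ← h2, ← h3]

-- ===== VERDICT (by name: the statement is the Claim_ definition above) =====
theorem coverage_report_py_spec : Claim_equal_coverage_report_py := by
  intro routes num_customers _
  unfold Spec_coverage_report_py
  exact coverage_report_py_spec_aux routes num_customers
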